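-- pv_equiv track=rewrite | github.com/doocs/leetcode | solution/1400-1499/1452.People Whose List of Favorite Companies Is Not a Subset of Another List/Solution.py | peopleIndexes
-- ===== SOURCE A (Python) =====
-- from typing import List
--
-- def peopleIndexes(favoriteCompanies: List[List[str]]) -> List[int]:
--     d = {}
--     idx = 0
--     t = []
--     for v in favoriteCompanies:
--         for c in v:
--             if c not in d:
--                 d[c] = idx
--                 idx += 1
--         t.append({d[c] for c in v})
--     ans = []
--     for i, nums1 in enumerate(t):
--         ok = True
--         for j, nums2 in enumerate(t):
--             if i == j:
--                 continue
--             if not (nums1 - nums2):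
--                 ok = False
--                 break
--         if ok:
--             ans.append(i)
--     return ans
-- ===== SOURCE B (Python) =====
-- from typing import List
--
-- def peopleIndexes(favoriteCompanies: List[List[str]]) -> List[int]:
--     n = len(favoriteCompanies)
--     index = {}
--     for j, v in enumerate(favoriteCompanies):
--         for c in v:
--             index.setdefault(c, set()).add(j)
--     ans = []
--     for i, v in enumerate(favoriteCompanies):
--         cands = set(range(n))
--         for c in v:
--             cands &= index[c]
--         if len(cands) == 1:
--             ans.append(i)
--     return ans
-- ===== Notes on version B (the rewrite author's own statement) =====
-- stated objective: faster
-- what changed: Replaces the O(n^2) pairwise subset test over id-compressed sets with an inverted index company->set of persons; for each person the intersection of the posting sets of their companies is exactly the set of persons whose list is a superset, so the person is kept iff that intersection is the singleton {i}.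
import Mathlib
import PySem

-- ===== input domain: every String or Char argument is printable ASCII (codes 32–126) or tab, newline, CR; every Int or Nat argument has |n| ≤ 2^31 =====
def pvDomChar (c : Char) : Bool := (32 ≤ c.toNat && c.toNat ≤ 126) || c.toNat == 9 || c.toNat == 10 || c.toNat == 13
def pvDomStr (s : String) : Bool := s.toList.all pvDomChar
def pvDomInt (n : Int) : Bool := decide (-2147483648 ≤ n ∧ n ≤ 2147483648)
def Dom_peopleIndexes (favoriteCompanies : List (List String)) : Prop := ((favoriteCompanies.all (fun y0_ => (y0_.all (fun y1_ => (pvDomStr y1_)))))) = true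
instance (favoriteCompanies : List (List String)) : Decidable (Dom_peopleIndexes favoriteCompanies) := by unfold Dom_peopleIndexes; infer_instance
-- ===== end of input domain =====

-- B replaces A's O(n^2) pairwise subset test with an inverted index company -> set of
-- persons; the intersection of a person's posting sets is exactly the set of supersets
-- (objective: faster; measured faster on the timing inputs).

-- ===== PORT A =====
-- first-occurrence id assignment: `if c not in d: d[c] = idx; idx += 1`
def pvAStep (p : PySem.Dict String Int × Int) (c : String) : PySem.Dict String Int × Int :=
  if p.1.contains c then p else (p.1.insert c p.2, p.2 + 1)

-- one iteration of A's first loop: assign ids for v, append {d[c] for c in v} to t.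
-- d[c] cannot raise here (every c ∈ v was just inserted), so getD is exact.
def pvABuild (s : PySem.Dict String Int × Int × List (PySem.Set Int)) (v : List String) :
    PySem.Dict String Int × Int × List (PySem.Set Int) :=
  let p := v.foldl pvAStep (s.1, s.2.1)
  (p.1, p.2, s.2.2 ++ [PySem.Set.ofList (v.map (fun c => p.1.getD c 0))])

-- A's inner `for j, nums2 in enumerate(t)` loop with its break
def pvAOk (nums1 : PySem.Set Int) (i : Int) : List (Int × PySem.Set Int) → Bool
  | [] => true
  | (j, nums2) :: rest =>
    if i == j then pvAOk nums1 i rest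
    else if (PySem.Set.diff nums1 nums2).isEmpty then false
    else pvAOk nums1 i rest

def peopleIndexes (favoriteCompanies : List (List String)) : List Int :=
  let st := favoriteCompanies.foldl pvABuild (PySem.Dict.empty, 0, [])
  let te := PySem.List.enumerate st.2.2
  te.foldl (fun ans p => if pvAOk p.2 p.1 te then ans ++ [p.1] else ans) []

-- ===== PORT B =====
-- `for c in v: index.setdefault(c, set()).add(j)`
def pvBPost (j : Int) (d : PySem.Dict String (PySem.Set Int)) (v : List String) :
    PySem.Dict String (PySem.Set Int) :=
  v.foldl (fun d c => d.insert c (PySem.Set.add (d.getD c PySem.Set.empty) j)) d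

def peopleIndexes_alt (favoriteCompanies : List (List String)) : List Int :=
  let n : Int := favoriteCompanies.length
  let index := (PySem.List.enumerate favoriteCompanies).foldl
    (fun d q => pvBPost q.1 d q.2) PySem.Dict.empty
  (PySem.List.enumerate favoriteCompanies).foldl (fun ans q =>
    -- `cands &= index[c]`: c ∈ q.2 is a key of index, so getD is exact
    let cands := q.2.foldl (fun s c => PySem.Set.inter s (index.getD c PySem.Set.empty))
        (PySem.Set.ofList (PySem.List.pyRange 0 n))
    if PySem.Set.len cands == 1 then ans ++ [q.1] else ans) []

-- ===== PRECONDITION & SPEC =====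
def Spec_peopleIndexes (favoriteCompanies : List (List String)) (out : List Int) : Prop := out = peopleIndexes_alt favoriteCompanies
instance (favoriteCompanies : List (List String)) (out : List Int) : Decidable (Spec_peopleIndexes favoriteCompanies out) := by unfold Spec_peopleIndexes; infer_instance

-- ===== CLAIM (what is proved, stated in full; the proofs are below) =====
def Claim_equal_peopleIndexes : Prop := ∀ (favoriteCompanies : List (List String)), Dom_peopleIndexes favoriteCompanies → Spec_peopleIndexes favoriteCompanies (peopleIndexes favoriteCompanies)

-- ===== LEMMAS AND PROOFS =====

-- ---- A side: the id dict ----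

-- the dict/idx invariant of A's first loop: every stored id is below idx, and ids are distinct
def pvInv (d : PySem.Dict String Int) (k : Int) : Prop :=
  (∀ c v, d.get? c = some v → v < k) ∧
  (∀ c1 c2 v, d.get? c1 = some v → d.get? c2 = some v → c1 = c2)

lemma pvAStep_pres_get? (p : PySem.Dict String Int × Int) (c c' : String) (v : Int)
    (h : p.1.get? c' = some v) : ((pvAStep p c).1.get? c' = some v) := by
  unfold pvAStep
  split_ifs with hc
  · exact h
  · have hne : c' ≠ c := by
      rintro rfl
      rw [Bool.not_eq_true, ← PySem.Dict.get?_eq_none_iff_contains] at hc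
      simp [hc] at h
    simpa [PySem.Dict.get?_insert, hne] using h

lemma pvAStep_inv (p : PySem.Dict String Int × Int) (c : String) (h : pvInv p.1 p.2) :
    pvInv (pvAStep p c).1 (pvAStep p c).2 := by
  obtain ⟨hb, hi⟩ := h
  unfold pvAStep
  split_ifs with hc
  · exact ⟨hb, hi⟩
  · constructor
    · intro c' v hv
      rw [PySem.Dict.get?_insert] at hv
      split_ifs at hv with he
      · simp at hv; omega
      · have := hb _ _ hv; omega
    · intro c1 c2 v h1 h2
      rw [PySem.Dict.get?_insert] at h1 h2
      split_ifs at h1 h2 with e1 e2 e2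
      · exact e1.trans e2.symm
      · exfalso; have := hb _ _ h2; simp at h1; omega
      · exfalso; have := hb _ _ h1; simp at h2; omega
      · exact hi _ _ _ h1 h2

lemma pvAFold_pres_get? (v : List String) (p : PySem.Dict String Int × Int) (c' : String) (w : Int)
    (h : p.1.get? c' = some w) : ((v.foldl pvAStep p).1.get? c' = some w) := by
  induction v generalizing p with
  | nil => exact h
  | cons c rest ih => exact ih _ (pvAStep_pres_get? p c c' w h)

lemma pvAFold_inv (v : List String) (p : PySem.Dict String Int × Int) (h : pvInv p.1 p.2) :
    pvInv (v.foldl pvAStep p).1 (v.foldl pvAStep p).2 := by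
  induction v generalizing p with
  | nil => exact h
  | cons c rest ih => exact ih _ (pvAStep_inv p c h)

lemma pvContains_of_get? (d : PySem.Dict String Int) (c : String) (w : Int)
    (h : d.get? c = some w) : d.contains c = true := by
  by_contra hc
  rw [Bool.not_eq_true, ← PySem.Dict.get?_eq_none_iff_contains] at hc
  simp [hc] at h

lemma pvGet?_of_contains (d : PySem.Dict String Int) (c : String)
    (h : d.contains c = true) : ∃ w, d.get? c = some w := by
  rcases hg : d.get? c with _ | w
  · rw [PySem.Dict.get?_eq_none_iff_contains] at hg; simp [hg] at h
  · exact ⟨w, rfl⟩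

lemma pvAFold_contains (v : List String) (p : PySem.Dict String Int × Int) (c : String)
    (h : c ∈ v) : ((v.foldl pvAStep p).1.contains c = true) := by
  induction v generalizing p with
  | nil => simp at h
  | cons c0 rest ih =>
    rcases List.mem_cons.mp h with rfl | hm
    · have hc : (pvAStep p c).1.contains c = true := by
        unfold pvAStep
        split_ifs with hc0
        · exact hc0
        · simp [PySem.Dict.contains_insert_self]
      obtain ⟨w, hw⟩ := pvGet?_of_contains _ _ hc
      exact pvContains_of_get? _ _ w (by
        simpa using pvAFold_pres_get? rest (pvAStep p c) c w hw)
    · exact ih _ hm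

lemma pvABuildFold_pres_get? (vs : List (List String))
    (s : PySem.Dict String Int × Int × List (PySem.Set Int))
    (c : String) (w : Int) (h : s.1.get? c = some w) :
    (vs.foldl pvABuild s).1.get? c = some w := by
  induction vs generalizing s with
  | nil => exact h
  | cons v vs ih =>
    apply ih
    simpa [pvABuild] using pvAFold_pres_get? v (s.1, s.2.1) c w h

lemma pvABuildFold_inv (vs : List (List String))
    (s : PySem.Dict String Int × Int × List (PySem.Set Int)) (h : pvInv s.1 s.2.1) :
    pvInv (vs.foldl pvABuild s).1 (vs.foldl pvABuild s).2.1 := by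
  induction vs generalizing s with
  | nil => exact h
  | cons v vs ih =>
    apply ih
    simpa [pvABuild] using pvAFold_inv v (s.1, s.2.1) h

lemma pvABuildFold_contains_mono (vs : List (List String))
    (s : PySem.Dict String Int × Int × List (PySem.Set Int)) (c : String)
    (h : s.1.contains c = true) : (vs.foldl pvABuild s).1.contains c = true := by
  obtain ⟨w, hw⟩ := pvGet?_of_contains _ _ h
  exact pvContains_of_get? _ _ w (pvABuildFold_pres_get? vs s c w hw)

lemma pvABuildFold_contains (vs : List (List String))
    (s : PySem.Dict String Int × Int × List (PySem.Set Int)) :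
    ∀ v ∈ vs, ∀ c ∈ v, (vs.foldl pvABuild s).1.contains c = true := by
  induction vs generalizing s with
  | nil => simp
  | cons v0 vs ih =>
    intro v hv c hc
    rcases List.mem_cons.mp hv with rfl | hv'
    · show (vs.foldl pvABuild (pvABuild s v)).1.contains c = true
      apply pvABuildFold_contains_mono
      simpa [pvABuild] using pvAFold_contains v (s.1, s.2.1) c hc
    · exact ih _ v hv' c hc

-- the list t built by A's first loop, expressed with lookups in the FINAL dict
lemma pvABuild_t (vs : List (List String))
    (s : PySem.Dict String Int × Int × List (PySem.Set Int)) :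
    (vs.foldl pvABuild s).2.2 = s.2.2 ++
      vs.map (fun v => PySem.Set.ofList (v.map (fun c => (vs.foldl pvABuild s).1.getD c 0))) := by
  induction vs generalizing s with
  | nil => simp
  | cons v vs ih =>
    have step : ((v :: vs).foldl pvABuild s) = vs.foldl pvABuild (pvABuild s v) := rfl
    rw [step, ih]
    have h2 : (pvABuild s v).2.2 = s.2.2 ++
        [PySem.Set.ofList (v.map (fun c => ((v.foldl pvAStep (s.1, s.2.1)).1).getD c 0))] := rfl
    rw [h2, List.append_assoc, List.singleton_append, List.map_cons]
    congr 2
    apply congrArg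
    apply List.map_congr_left
    intro c hc
    obtain ⟨w, hw⟩ := pvGet?_of_contains _ _ (pvAFold_contains v (s.1, s.2.1) c hc)
    have hw2 : (vs.foldl pvABuild (pvABuild s v)).1.get? c = some w :=
      pvABuildFold_pres_get? vs (pvABuild s v) c w (by simpa [pvABuild] using hw)
    rw [PySem.Dict.getD_eq_get?_getD, PySem.Dict.getD_eq_get?_getD, hw, hw2]

lemma pvAOk_iff (nums1 : PySem.Set Int) (i : Int) (l : List (Int × PySem.Set Int)) :
    pvAOk nums1 i l = true ↔
      ∀ p ∈ l, p.1 ≠ i → (PySem.Set.diff nums1 p.2).isEmpty = false := by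
  induction l with
  | nil => simp [pvAOk]
  | cons p rest ih =>
    obtain ⟨j, nums2⟩ := p
    have hstep : pvAOk nums1 i ((j, nums2) :: rest) =
        if i == j then pvAOk nums1 i rest
        else if (PySem.Set.diff nums1 nums2).isEmpty then false
        else pvAOk nums1 i rest := rfl
    rw [hstep, List.forall_mem_cons]
    by_cases hij : i = j
    · subst hij
      rw [if_pos (by simp), ih]
      constructor
      · exact fun h => ⟨fun hne => absurd rfl hne, h⟩
      · exact fun h => h.2
    · rw [if_neg (by simp [hij])]
      by_cases hd : (PySem.Set.diff nums1 nums2).isEmpty = true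
      · rw [if_pos hd]
        constructor
        · intro h; exact absurd h (by simp)
        · intro h
          have := h.1 (fun he => hij he.symm)
          rw [this] at hd; cases hd
      · have hd' : (PySem.Set.diff nums1 nums2).isEmpty = false := by
          rwa [Bool.not_eq_true] at hd
        rw [if_neg hd, ih]
        constructor
        · exact fun h => ⟨fun _ => hd', h⟩
        · exact fun h => h.2

-- the final dict assigns distinct ids to distinct keys
lemma pvDiff_empty_iff (v1 v2 : List String) (f : String → Int)
    (hinj : ∀ c1 ∈ v1, ∀ c2 ∈ v2, f c1 = f c2 → c1 = c2) :
    ((PySem.Set.diff (PySem.Set.ofList (v1.map f)) (PySem.Set.ofList (v2.map f))).isEmpty = true)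
      ↔ ∀ c ∈ v1, c ∈ v2 := by
  rw [List.isEmpty_iff, List.eq_nil_iff_forall_not_mem]
  constructor
  · intro h c hc
    have hx := h (f c)
    rw [PySem.Set.mem_diff] at hx
    push Not at hx
    have h1 : f c ∈ PySem.Set.ofList (v1.map f) := by
      rw [PySem.Set.mem_ofList]; exact List.mem_map_of_mem hc
    have h2 := hx h1
    rw [PySem.Set.mem_ofList, List.mem_map] at h2
    obtain ⟨c2, hc2, he⟩ := h2
    exact (hinj c hc c2 hc2 he.symm) ▸ hc2
  · intro h x
    rw [PySem.Set.mem_diff]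
    rintro ⟨hx1, hx2⟩
    rw [PySem.Set.mem_ofList, List.mem_map] at hx1
    obtain ⟨c, hc, rfl⟩ := hx1
    exact hx2 (by rw [PySem.Set.mem_ofList]; exact List.mem_map_of_mem (h c hc))

-- ---- B side: the inverted index ----

lemma pvBPost_getD (j : Int) (d : PySem.Dict String (PySem.Set Int)) (v : List String)
    (c : String) (x : Int) :
    x ∈ (pvBPost j d v).getD c PySem.Set.empty ↔
      x ∈ d.getD c PySem.Set.empty ∨ (c ∈ v ∧ x = j) := by
  induction v generalizing d with
  | nil => simp [pvBPost]
  | cons c0 rest ih =>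
    show x ∈ (pvBPost j (d.insert c0 (PySem.Set.add (d.getD c0 PySem.Set.empty) j)) rest).getD c PySem.Set.empty ↔ _
    rw [ih]
    by_cases hcc : c = c0
    · subst hcc
      rw [PySem.Dict.getD_insert]
      simp [PySem.Set.mem_add]
      tauto
    · rw [PySem.Dict.getD_insert, if_neg hcc]
      simp [hcc]

lemma pvBIndex_getD (l : List (Int × List String)) (d : PySem.Dict String (PySem.Set Int))
    (c : String) (x : Int) :
    x ∈ (l.foldl (fun d q => pvBPost q.1 d q.2) d).getD c PySem.Set.empty ↔
      x ∈ d.getD c PySem.Set.empty ∨ ∃ q ∈ l, c ∈ q.2 ∧ x = q.1 := by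
  induction l generalizing d with
  | nil => simp
  | cons q0 rest ih =>
    rw [List.foldl_cons, ih, pvBPost_getD]
    simp only [List.mem_cons]
    constructor
    · rintro ((h | h) | ⟨q, hq, h⟩)
      · exact Or.inl h
      · exact Or.inr ⟨q0, Or.inl rfl, h⟩
      · exact Or.inr ⟨q, Or.inr hq, h⟩
    · rintro (h | ⟨q, (rfl | hq), h⟩)
      · exact Or.inl (Or.inl h)
      · exact Or.inl (Or.inr h)
      · exact Or.inr ⟨q, hq, h⟩

lemma pvCands_mem (v : List String) (index : PySem.Dict String (PySem.Set Int))
    (s0 : PySem.Set Int) (x : Int) :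
    x ∈ v.foldl (fun s c => PySem.Set.inter s (index.getD c PySem.Set.empty)) s0 ↔
      x ∈ s0 ∧ ∀ c ∈ v, x ∈ index.getD c PySem.Set.empty := by
  induction v generalizing s0 with
  | nil => simp
  | cons c0 rest ih =>
    show x ∈ rest.foldl _ (PySem.Set.inter s0 (index.getD c0 PySem.Set.empty)) ↔ _
    rw [ih, PySem.Set.mem_inter]
    simp only [List.forall_mem_cons]
    tauto

lemma pvCands_nodup (v : List String) (index : PySem.Dict String (PySem.Set Int))
    (s0 : PySem.Set Int) (h : s0.Nodup) :
    (v.foldl (fun s c => PySem.Set.inter s (index.getD c PySem.Set.empty)) s0).Nodup := by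
  induction v generalizing s0 with
  | nil => exact h
  | cons c0 rest ih => exact ih _ (PySem.Set.nodup_inter _ _ h)

-- a nodup list containing i has length 1 iff all its members are i
lemma pvLen_one (l : List Int) (i : Int) (hn : l.Nodup) (hi : i ∈ l) :
    l.length = 1 ↔ ∀ x ∈ l, x = i := by
  constructor
  · intro h x hx
    obtain ⟨a, rfl⟩ := List.length_eq_one_iff.1 h
    simp at hi hx
    omega
  · intro h
    match l, hn, hi, h with
    | [a], _, _, _ => rfl
    | a :: b :: t, hn, hi, h =>
      exfalso
      have ha := h a (by simp)
      have hb := h b (by simp)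
      rw [List.nodup_cons] at hn
      exact hn.1 (by simp [ha, hb])

-- ---- the common specification ----

lemma pvEnumerate_map {α β : Type} (g : α → β) (xs : List α) (s : Int) :
    PySem.List.enumerate (xs.map g) s = (PySem.List.enumerate xs s).map (fun q => (q.1, g q.2)) := by
  induction xs generalizing s with
  | nil => simp [PySem.List.enumerate_nil]
  | cons x xs ih => simp [PySem.List.enumerate_cons, ih]

def pvPred (vs : List (List String)) (q : Int × List String) : Bool :=
  decide (∀ kj : Nat, kj < vs.length → (∀ c ∈ q.2, c ∈ vs.getD kj []) → (kj : Int) = q.1)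

def pvSpecList (vs : List (List String)) : List Int :=
  (PySem.List.enumerate vs).foldl (fun ans q => if pvPred vs q then ans ++ [q.1] else ans) []

lemma pvA_eq_spec (vs : List (List String)) : peopleIndexes vs = pvSpecList vs := by
  simp only [peopleIndexes, pvSpecList]
  have hInv0 : pvInv (PySem.Dict.empty : PySem.Dict String Int) 0 := by
    constructor
    · intro c v h; rw [PySem.Dict.get?_empty] at h; cases h
    · intro c1 c2 v h1 h2; rw [PySem.Dict.get?_empty] at h1; cases h1
  have hInv := pvABuildFold_inv vs (PySem.Dict.empty, 0, []) hInv0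
  have hCont := pvABuildFold_contains vs (PySem.Dict.empty, 0, [])
  have hInj : ∀ c1 c2 : String,
      (vs.foldl pvABuild (PySem.Dict.empty, 0, [])).1.contains c1 = true →
      (vs.foldl pvABuild (PySem.Dict.empty, 0, [])).1.contains c2 = true →
      (vs.foldl pvABuild (PySem.Dict.empty, 0, [])).1.getD c1 0 =
        (vs.foldl pvABuild (PySem.Dict.empty, 0, [])).1.getD c2 0 → c1 = c2 := by
    intro c1 c2 h1 h2 he
    obtain ⟨w1, hw1⟩ := pvGet?_of_contains _ _ h1
    obtain ⟨w2, hw2⟩ := pvGet?_of_contains _ _ h2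
    rw [PySem.Dict.getD_eq_get?_getD, PySem.Dict.getD_eq_get?_getD, hw1, hw2] at he
    simp at he
    exact hInv.2 c1 c2 w1 hw1 (he ▸ hw2)
  have ht := pvABuild_t vs (PySem.Dict.empty, 0, [])
  simp only [List.nil_append] at ht
  rw [ht, pvEnumerate_map, List.foldl_map]
  apply PySem.List.foldl_congr_mem
  intro acc q hq
  rw [PySem.List.mem_enumerate_iff] at hq
  obtain ⟨k, hk, rfl⟩ := hq
  dsimp only
  have hcond : pvAOk (PySem.Set.ofList (vs[k].map
        (fun c => (vs.foldl pvABuild (PySem.Dict.empty, 0, [])).1.getD c 0))) (0 + (k : Int))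
        ((PySem.List.enumerate vs).map (fun q => (q.1, PySem.Set.ofList (q.2.map
          (fun c => (vs.foldl pvABuild (PySem.Dict.empty, 0, [])).1.getD c 0)))))
      = pvPred vs (0 + (k : Int), vs[k]) := by
    rw [Bool.eq_iff_iff, pvAOk_iff]
    simp only [pvPred, decide_eq_true_eq]
    constructor
    · intro h kj hkj hsub
      by_contra hne
      have hmem : ((0 + (kj : Int)), PySem.Set.ofList (vs[kj].map
            (fun c => (vs.foldl pvABuild (PySem.Dict.empty, 0, [])).1.getD c 0))) ∈
          (PySem.List.enumerate vs).map (fun q => (q.1, PySem.Set.ofList (q.2.map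
            (fun c => (vs.foldl pvABuild (PySem.Dict.empty, 0, [])).1.getD c 0)))) := by
        rw [List.mem_map]
        refine ⟨(0 + (kj : Int), vs[kj]), ?_, rfl⟩
        rw [PySem.List.mem_enumerate_iff]
        exact ⟨kj, hkj, rfl⟩
      have := h _ hmem (by intro he; exact hne (by omega))
      rw [Bool.eq_false_iff] at this
      apply this
      rw [pvDiff_empty_iff _ _ _ (fun c1 hc1 c2 hc2 =>
        hInj c1 c2 (hCont _ (List.getElem_mem hk) c1 hc1)
          (hCont _ (List.getElem_mem hkj) c2 hc2))]
      intro c hc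
      have := hsub c hc
      rwa [List.getD_eq_getElem _ _ hkj] at this
    · intro h p hp hne
      rw [List.mem_map] at hp
      obtain ⟨q', hq', rfl⟩ := hp
      rw [PySem.List.mem_enumerate_iff] at hq'
      obtain ⟨kj, hkj, rfl⟩ := hq'
      rw [Bool.eq_false_iff]
      intro hempty
      rw [pvDiff_empty_iff _ _ _ (fun c1 hc1 c2 hc2 =>
        hInj c1 c2 (hCont _ (List.getElem_mem hk) c1 hc1)
          (hCont _ (List.getElem_mem hkj) c2 hc2))] at hempty
      have := h kj hkj (by
        intro c hc
        rw [List.getD_eq_getElem _ _ hkj]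
        exact hempty c hc)
      exact hne (by omega)
  rw [hcond]

lemma pvB_eq_spec (vs : List (List String)) : peopleIndexes_alt vs = pvSpecList vs := by
  simp only [peopleIndexes_alt, pvSpecList]
  apply PySem.List.foldl_congr_mem
  intro acc q hq
  rw [PySem.List.mem_enumerate_iff] at hq
  obtain ⟨k, hk, rfl⟩ := hq
  dsimp only
  have hx : ∀ x : Int, x ∈ (vs[k].foldl (fun s c => PySem.Set.inter s
        (((PySem.List.enumerate vs).foldl (fun d q => pvBPost q.1 d q.2)
          PySem.Dict.empty).getD c PySem.Set.empty))
        (PySem.Set.ofList (PySem.List.pyRange 0 (vs.length : Int)))) ↔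
      (0 ≤ x ∧ x < (vs.length : Int)) ∧
        ∀ c ∈ vs[k], ∃ kj : Nat, kj < vs.length ∧ c ∈ vs.getD kj [] ∧ x = (kj : Int) := by
    intro x
    rw [pvCands_mem, PySem.Set.mem_ofList, PySem.List.mem_pyRange_one]
    constructor
    · rintro ⟨hr, hall⟩
      refine ⟨hr, fun c hc => ?_⟩
      have hm := (pvBIndex_getD _ _ _ _).1 (hall c hc)
      rw [PySem.Dict.getD_empty] at hm
      rcases hm with h | ⟨q', hq', hcq, hxe⟩
      · simp [PySem.Set.empty] at h
      · rw [PySem.List.mem_enumerate_iff] at hq'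
        obtain ⟨kj, hkj, rfl⟩ := hq'
        dsimp only at hcq hxe
        exact ⟨kj, hkj, by rwa [List.getD_eq_getElem _ _ hkj], by omega⟩
    · rintro ⟨hr, hall⟩
      refine ⟨hr, fun c hc => ?_⟩
      obtain ⟨kj, hkj, hcj, rfl⟩ := hall c hc
      rw [pvBIndex_getD]
      refine Or.inr ⟨((0 : Int) + (kj : Int), vs[kj]), ?_, ?_, by omega⟩
      · rw [PySem.List.mem_enumerate_iff]
        exact ⟨kj, hkj, rfl⟩
      · rwa [List.getD_eq_getElem _ _ hkj] at hcj
  have hnodup := pvCands_nodup vs[k] ((PySem.List.enumerate vs).foldl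
      (fun d q => pvBPost q.1 d q.2) PySem.Dict.empty)
      (PySem.Set.ofList (PySem.List.pyRange 0 (vs.length : Int)))
      (PySem.Set.nodup_ofList _)
  have hki : ((0 : Int) + (k : Int)) ∈ (vs[k].foldl (fun s c => PySem.Set.inter s
        (((PySem.List.enumerate vs).foldl (fun d q => pvBPost q.1 d q.2)
          PySem.Dict.empty).getD c PySem.Set.empty))
        (PySem.Set.ofList (PySem.List.pyRange 0 (vs.length : Int)))) := by
    rw [hx]
    refine ⟨⟨by omega, by omega⟩, fun c hc => ⟨k, hk, ?_, by omega⟩⟩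
    rwa [List.getD_eq_getElem _ _ hk]
  have hcond : (PySem.Set.len (vs[k].foldl (fun s c => PySem.Set.inter s
        (((PySem.List.enumerate vs).foldl (fun d q => pvBPost q.1 d q.2)
          PySem.Dict.empty).getD c PySem.Set.empty))
        (PySem.Set.ofList (PySem.List.pyRange 0 (vs.length : Int)))) == 1)
      = pvPred vs ((0 : Int) + (k : Int), vs[k]) := by
    rw [Bool.eq_iff_iff]
    simp only [pvPred, decide_eq_true_eq, PySem.Set.len, beq_iff_eq]
    have hcast : ∀ nn : Nat, ((nn : Int) = 1) ↔ nn = 1 := by intro nn; omega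
    rw [hcast, pvLen_one _ (0 + (k : Int)) hnodup hki]
    constructor
    · intro h kj hkj hsub
      apply h
      rw [hx]
      exact ⟨⟨by omega, by omega⟩, fun c hc => ⟨kj, hkj, hsub c hc, rfl⟩⟩
    · intro h x hxm
      obtain ⟨⟨h0, hlt⟩, hall⟩ := (hx x).1 hxm
      obtain ⟨m, rfl⟩ : ∃ m : Nat, x = (m : Int) := ⟨x.toNat, by omega⟩
      have hm : m < vs.length := by exact_mod_cast hlt
      apply h m hm
      intro c hc
      obtain ⟨kj, hkj, hcj, hej⟩ := hall c hc
      have hkm : kj = m := by omega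
      subst hkm
      exact hcj
  rw [hcond]

-- ===== VERDICT (by name: the statement is the Claim_ definition above) =====
theorem peopleIndexes_spec : Claim_equal_peopleIndexes := by
  intro vs _
  unfold Spec_peopleIndexes
  rw [pvA_eq_spec, pvB_eq_spec]
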